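-- pv_equiv track=rewrite | github.com/subakpup/Algorithm | 17472.py | setting
-- ===== SOURCE A (Python) =====
-- def setting(arr):
--     dic = dict()
--     for length, s, e in arr: # 다리 정보 추출
--         key = (s, e) # 시작, 도착 섬을 키로 설정
--         if key not in dic or length < dic[key]: # 키값이 딕셔너리에 없거나 더 짧은 다리일 경우
--             dic[key] = length # 딕셔너리에 업데이트
--
--     # 중복되는 다리를 제거했으면 리스트로 반환
--     result = []
--     for (s, e), length in dic.items():
--         result.append((length, s, e))
--
--     return result
-- ===== SOURCE B (Python) =====
-- def setting(arr):
--     result = []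
--     prev = []
--     for t in arr:
--         length, s, e = t
--         if all(not (a == s and b == e) for _, a, b in prev):
--             result.append((min(l for l, a, b in arr if a == s and b == e), s, e))
--         prev.append(t)
--     return result
-- ===== Notes on version B (the rewrite author's own statement) =====
-- stated objective: alternative
-- what changed: B eliminates the dict entirely: it scans the input and, at each first occurrence of a (start,end) key, computes that key's minimum length by a fresh full scan (min over a filtered pass of arr), instead of maintaining per-key running minima in a dict and then reformatting dic.items(); B trades A's O(n) hash algorithm for an O(n^2) index-free nested-scan one.
import Mathlib
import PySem

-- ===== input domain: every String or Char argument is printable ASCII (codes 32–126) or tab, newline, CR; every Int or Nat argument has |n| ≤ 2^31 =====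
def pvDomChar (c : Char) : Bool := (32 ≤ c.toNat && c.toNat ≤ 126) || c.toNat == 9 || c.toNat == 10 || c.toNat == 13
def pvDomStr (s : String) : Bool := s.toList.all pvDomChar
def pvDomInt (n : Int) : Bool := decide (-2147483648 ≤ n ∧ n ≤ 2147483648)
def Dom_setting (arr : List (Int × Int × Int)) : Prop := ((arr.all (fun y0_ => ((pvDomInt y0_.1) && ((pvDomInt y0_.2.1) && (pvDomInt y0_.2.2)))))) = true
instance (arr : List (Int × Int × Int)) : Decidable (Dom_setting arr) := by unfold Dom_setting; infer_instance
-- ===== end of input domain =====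

-- B replaces A's dict of running minima by an index-free brute-force scan:
-- at each first occurrence of a (start,end) key it computes that key's minimum
-- length by a fresh full pass over arr (O(n^2) instead of O(n)); return values
-- are proved equal.

-- ===== PORT A =====
-- loop body of A's first for-loop: dict of minimal length per (s, e) key
def settingStepA (d : PySem.Dict (Int × Int) Int) (t : Int × Int × Int) : PySem.Dict (Int × Int) Int :=
  let key := (t.2.1, t.2.2)
  -- 'key not in dic or length < dic[key]' (dic[key] is only read when present, so getD is exact)
  if d.contains key = false ∨ t.1 < d.getD key 0 then d.insert key t.1 else d

def setting (arr : List (Int × Int × Int)) : List (Int × Int × Int) :=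
  let dic := arr.foldl settingStepA PySem.Dict.empty
  dic.items.foldl (fun result p => result ++ [(p.2, p.1.1, p.1.2)]) []

-- ===== PORT B =====
-- the inline condition 'a == s and b == e' of Source B's two generator expressions, as a named predicate
def kpred (k : Int × Int) (u : Int × Int × Int) : Bool := u.2.1 == k.1 && u.2.2 == k.2

-- loop body of B's pass: state (result, prev); prev is the already-seen prefix
def settingStepB (arr : List (Int × Int × Int)) (st : List (Int × Int × Int) × List (Int × Int × Int))
    (t : Int × Int × Int) : List (Int × Int × Int) × List (Int × Int × Int) :=
  let s := t.2.1
  let e := t.2.2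
  if st.2.all (fun u => !(kpred (s, e) u)) then
    -- min(l for l, a, b in arr if a == s and b == e): the filtered list contains t itself,
    -- so min? is always some and getD's default is never used
    (st.1 ++ [((PySem.List.min? ((arr.filter (kpred (s, e))).map (fun u => u.1)) (fun x => x)).getD 0, s, e)],
     st.2 ++ [t])
  else (st.1, st.2 ++ [t])

def setting_alt (arr : List (Int × Int × Int)) : List (Int × Int × Int) :=
  (arr.foldl (settingStepB arr) ([], [])).1

-- ===== PRECONDITION & SPEC =====
def Spec_setting (arr : List (Int × Int × Int)) (out : List (Int × Int × Int)) : Prop := out = setting_alt arr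
instance (arr : List (Int × Int × Int)) (out : List (Int × Int × Int)) : Decidable (Spec_setting arr out) := by unfold Spec_setting; infer_instance

-- ===== CLAIM (what is proved, stated in full; the proofs are below) =====
def Claim_equal_setting : Prop := ∀ (arr : List (Int × Int × Int)), Dom_setting arr → Spec_setting arr (setting arr)

-- ===== LEMMAS AND PROOFS =====

-- the (s, e) key of a bridge entry
def kf (t : Int × Int × Int) : Int × Int := (t.2.1, t.2.2)

-- minimum length among entries of l with key k (0 if none; only used when some exist)
def minOf (l : List (Int × Int × Int)) (k : Int × Int) : Int :=
  match (l.filter (kpred k)).map (fun u => u.1) with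
  | [] => 0
  | x :: r => r.foldl min x

-- the common characterisation both programs are reduced to: first-occurrence keys, each with its min
def specI (l : List (Int × Int × Int)) : List ((Int × Int) × Int) :=
  (PySem.Set.ofList (l.map kf)).map (fun k => (k, minOf l k))

lemma stepA_eq (d : PySem.Dict (Int × Int) Int) (t : Int × Int × Int) :
    settingStepA d t
      = if d.contains (kf t) = false ∨ t.1 < d.getD (kf t) 0 then d.insert (kf t) t.1 else d := rfl

lemma stepB_eq (arr : List (Int × Int × Int)) (st : List (Int × Int × Int) × List (Int × Int × Int))
    (t : Int × Int × Int) :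
    settingStepB arr st t
      = if st.2.all (fun u => !(kpred (kf t) u)) then
          (st.1 ++ [((PySem.List.min? ((arr.filter (kpred (kf t))).map (fun u => u.1)) (fun x => x)).getD 0,
            (kf t).1, (kf t).2)], st.2 ++ [t])
        else (st.1, st.2 ++ [t]) := rfl

lemma kpred_iff (k : Int × Int) (u : Int × Int × Int) : kpred k u = true ↔ kf u = k := by
  simp [kpred, kf, Prod.ext_iff]

lemma kpred_self (t : Int × Int × Int) : kpred (kf t) t = true := by simp [kpred, kf]

lemma filter_nil_iff (l : List (Int × Int × Int)) (k : Int × Int) :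
    l.filter (kpred k) = [] ↔ k ∉ l.map kf := by
  rw [List.filter_eq_nil_iff]
  constructor
  · intro h hmem
    obtain ⟨u, hu, hk⟩ := List.mem_map.mp hmem
    exact h u hu ((kpred_iff k u).mpr hk)
  · intro h u hu hp
    exact h (List.mem_map.mpr ⟨u, hu, (kpred_iff k u).mp hp⟩)

lemma kpred_false_of_ne (t : Int × Int × Int) (k : Int × Int) (h : k ≠ kf t) :
    kpred k t = false := by
  cases hpe : kpred k t with
  | false => rfl
  | true => exact absurd ((kpred_iff k t).mp hpe) (fun he => h he.symm)

lemma minOf_append_neg (l : List (Int × Int × Int)) (t : Int × Int × Int) (k : Int × Int)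
    (h : kpred k t = false) : minOf (l ++ [t]) k = minOf l k := by
  simp [minOf, List.filter_append, h]

lemma minOf_append_pos_nil (l : List (Int × Int × Int)) (t : Int × Int × Int) (k : Int × Int)
    (h : kpred k t = true) (h2 : l.filter (kpred k) = []) : minOf (l ++ [t]) k = t.1 := by
  simp [minOf, List.filter_append, h, h2]

lemma minOf_append_pos (l : List (Int × Int × Int)) (t : Int × Int × Int) (k : Int × Int)
    (h : kpred k t = true) (x : Int × Int × Int) (r : List (Int × Int × Int))
    (h2 : l.filter (kpred k) = x :: r) : minOf (l ++ [t]) k = min (minOf l k) t.1 := by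
  simp only [minOf, List.filter_append, h2, List.filter_cons_of_pos h, List.filter_nil,
    List.map_append, List.map_cons, List.map_nil, List.cons_append]
  rw [List.foldl_append]
  rfl

lemma filter_cons_exists (l : List (Int × Int × Int)) (k : Int × Int) (h : k ∈ l.map kf) :
    ∃ x r, l.filter (kpred k) = x :: r := by
  cases hfe : l.filter (kpred k) with
  | nil => exact absurd ((filter_nil_iff l k).mp hfe) (by simpa using h)
  | cons x r => exact ⟨x, r, rfl⟩

lemma set_add_of_mem {α : Type} [BEq α] [LawfulBEq α] (s : List α) (x : α) (h : x ∈ s) :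
    PySem.Set.add s x = s := by
  simp [PySem.Set.add, h]

lemma set_add_of_not_mem {α : Type} [BEq α] [LawfulBEq α] (s : List α) (x : α) (h : x ∉ s) :
    PySem.Set.add s x = s ++ [x] := by
  simp [PySem.Set.add, h]

-- A's first loop builds exactly specI
lemma A_items (l : List (Int × Int × Int)) :
    (l.foldl settingStepA PySem.Dict.empty).items = specI l := by
  induction l using List.reverseRecOn with
  | nil => rfl
  | append_singleton l t ih =>
      rw [List.foldl_append, List.foldl_cons, List.foldl_nil, stepA_eq]
      set d := l.foldl settingStepA PySem.Dict.empty with hd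
      have hkeys : d.keys = PySem.Set.ofList (l.map kf) := by
        show d.items.map Prod.fst = _
        rw [ih]
        unfold specI
        rw [List.map_map]
        exact List.map_id' _
      have hknd : d.keys.Nodup := by rw [hkeys]; exact PySem.Set.nodup_ofList _
      have hmapkf : (l ++ [t]).map kf = l.map kf ++ [kf t] := by simp
      by_cases hm : kf t ∈ l.map kf
      · -- key already present
        have hmemset : kf t ∈ PySem.Set.ofList (l.map kf) :=
          (PySem.Set.mem_ofList _ _).mpr hm
        have hmem : ((kf t), minOf l (kf t)) ∈ d.items := by
          rw [ih]; exact List.mem_map_of_mem hmemset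
        have hget : d.get? (kf t) = some (minOf l (kf t)) :=
          PySem.Dict.get?_of_mem_items d hmem hknd
        have hcont : d.contains (kf t) = true := by
          rw [PySem.Dict.contains_eq_isSome_get?, hget]; rfl
        have hgetD : d.getD (kf t) 0 = minOf l (kf t) := by
          rw [PySem.Dict.getD_eq_get?_getD, hget]; rfl
        obtain ⟨x, r, hxr⟩ := filter_cons_exists l (kf t) hm
        have hofl : PySem.Set.ofList ((l ++ [t]).map kf) = PySem.Set.ofList (l.map kf) := by
          rw [hmapkf, PySem.Set.ofList_append_singleton,
            set_add_of_mem _ _ hmemset]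
        by_cases hlt : t.1 < minOf l (kf t)
        · rw [if_pos (Or.inr (by rwa [hgetD])),
            PySem.Dict.items_insert_of_contains _ _ hcont, ih]
          unfold specI
          rw [hofl, List.map_map]
          apply List.map_congr_left
          intro k' _
          simp only [Function.comp_apply]
          by_cases hk' : k' = kf t
          · subst hk'
            rw [if_pos (by simp)]
            rw [minOf_append_pos l t (kf t) (kpred_self t) x r hxr,
              min_eq_right (le_of_lt hlt)]
          · rw [if_neg (by simpa using hk'),
              minOf_append_neg l t k' (kpred_false_of_ne t k' hk')]
        · rw [if_neg (by rw [hcont, hgetD]; push Not; exact ⟨by simp, not_lt.mp hlt⟩), ih]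
          unfold specI
          rw [hofl]
          apply List.map_congr_left
          intro k' _
          by_cases hk' : k' = kf t
          · subst hk'
            rw [minOf_append_pos l t (kf t) (kpred_self t) x r hxr,
              min_eq_left (not_lt.mp hlt)]
          · rw [minOf_append_neg l t k' (kpred_false_of_ne t k' hk')]
      · -- fresh key
        have hnotset : kf t ∉ PySem.Set.ofList (l.map kf) := by
          intro h; exact hm ((PySem.Set.mem_ofList _ _).mp h)
        have hget : d.get? (kf t) = none := by
          rw [PySem.Dict.get?_eq_none_iff_not_mem_keys, hkeys]; exact hnotset
        have hcont : d.contains (kf t) = false := by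
          rw [PySem.Dict.contains_eq_isSome_get?, hget]; rfl
        rw [if_pos (Or.inl hcont),
          PySem.Dict.items_insert_of_not_contains _ _ hcont, ih]
        unfold specI
        rw [hmapkf, PySem.Set.ofList_append_singleton,
          set_add_of_not_mem _ _ hnotset,
          List.map_append, List.map_cons, List.map_nil]
        congr 1
        · apply List.map_congr_left
          intro k' hk'mem
          have hk' : k' ≠ kf t := fun he => hnotset (he ▸ hk'mem)
          rw [minOf_append_neg l t k' (kpred_false_of_ne t k' hk')]
        · rw [minOf_append_pos_nil l t (kf t) (kpred_self t)
            ((filter_nil_iff l (kf t)).mpr hm)]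

-- B's guard is exactly 'key of t unseen in prev'
lemma guard_iff (p : List (Int × Int × Int)) (k : Int × Int) :
    (p.all (fun u => !(kpred k u)) = true) ↔ k ∉ p.map kf := by
  rw [List.all_eq_true]
  constructor
  · intro h hmem
    obtain ⟨u, hu, hk⟩ := List.mem_map.mp hmem
    have := h u hu
    rw [(kpred_iff k u).mpr hk] at this
    exact absurd this (by simp)
  · intro h u hu
    have : kpred k u = false := by
      cases hpe : kpred k u with
      | false => rfl
      | true => exact absurd (List.mem_map.mpr ⟨u, hu, (kpred_iff k u).mp hpe⟩) h
    simp [this]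

-- B's min expression equals minOf, for an element of arr
lemma min_expr_eq (arr : List (Int × Int × Int)) (t : Int × Int × Int) (ht : t ∈ arr) :
    (PySem.List.min? ((arr.filter (kpred (kf t))).map (fun u => u.1)) (fun x => x)).getD 0
      = minOf arr (kf t) := by
  obtain ⟨x, r, hxr⟩ := filter_cons_exists arr (kf t) (List.mem_map_of_mem ht)
  rw [minOf, hxr]
  simp only [List.map_cons]
  rw [PySem.List.min?_id_cons]
  rfl

-- B's loop invariant
lemma B_inv (arr : List (Int × Int × Int)) (rest : List (Int × Int × Int)) :
    ∀ (p : List (Int × Int × Int)), (∀ u ∈ rest, u ∈ arr) →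
    (rest.foldl (settingStepB arr)
        ((PySem.Set.ofList (p.map kf)).map (fun k => (minOf arr k, k.1, k.2)), p)).1
      = (PySem.Set.ofList ((p ++ rest).map kf)).map (fun k => (minOf arr k, k.1, k.2)) := by
  induction rest with
  | nil => intro p _; simp
  | cons t rest ih =>
      intro p hsub
      rw [List.foldl_cons, stepB_eq]
      have hmapkf : (p ++ [t]).map kf = p.map kf ++ [kf t] := by simp
      by_cases hm : kf t ∈ p.map kf
      · have hg : (p.all (fun u => !(kpred (kf t) u))) = false := by
          cases hge : p.all (fun u => !(kpred (kf t) u)) with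
          | false => rfl
          | true => exact absurd hm ((guard_iff p (kf t)).mp hge)
        rw [if_neg (by rw [hg]; simp)]
        have hof : PySem.Set.ofList ((p ++ [t]).map kf) = PySem.Set.ofList (p.map kf) := by
          rw [hmapkf, PySem.Set.ofList_append_singleton,
            set_add_of_mem _ _ ((PySem.Set.mem_ofList _ _).mpr hm)]
        have hrec := ih (p ++ [t]) (fun u hu => hsub u (List.mem_cons_of_mem t hu))
        rw [hof] at hrec
        rw [hrec, List.append_assoc]
        simp
      · have hg : (p.all (fun u => !(kpred (kf t) u))) = true := (guard_iff p (kf t)).mpr hm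
        rw [if_pos hg]
        have hof : PySem.Set.ofList ((p ++ [t]).map kf)
            = PySem.Set.ofList (p.map kf) ++ [kf t] := by
          rw [hmapkf, PySem.Set.ofList_append_singleton,
            set_add_of_not_mem _ _ (fun h => hm ((PySem.Set.mem_ofList _ _).mp h))]
        have hfront :
            (PySem.Set.ofList (p.map kf)).map (fun k => (minOf arr k, k.1, k.2))
              ++ [((PySem.List.min? ((arr.filter (kpred (kf t))).map (fun u => u.1)) (fun x => x)).getD 0,
                    (kf t).1, (kf t).2)]
              = (PySem.Set.ofList ((p ++ [t]).map kf)).map (fun k => (minOf arr k, k.1, k.2)) := by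
          rw [hof, List.map_append, List.map_cons, List.map_nil,
            min_expr_eq arr t (hsub t List.mem_cons_self)]
        rw [hfront]
        have hrec := ih (p ++ [t]) (fun u hu => hsub u (List.mem_cons_of_mem t hu))
        rw [hrec, List.append_assoc]
        simp

-- A's second loop is an appending fold = a map
lemma foldl_append_map (l : List ((Int × Int) × Int)) (acc : List (Int × Int × Int)) :
    l.foldl (fun result p => result ++ [(p.2, p.1.1, p.1.2)]) acc
      = acc ++ l.map (fun p => (p.2, p.1.1, p.1.2)) := by
  induction l generalizing acc with
  | nil => simp
  | cons a r ih => simp [ih]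

-- ===== VERDICT (by name: the statement is the Claim_ definition above) =====
theorem setting_spec : Claim_equal_setting := by
  intro arr _
  unfold Spec_setting setting setting_alt
  rw [foldl_append_map, A_items]
  have hB := B_inv arr arr [] (fun u hu => hu)
  simp only [List.map_nil, PySem.Set.ofList_nil, List.nil_append] at hB
  rw [hB]
  unfold specI
  rw [List.map_map]
  rfl
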